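-- pv_equiv track=rewrite | github.com/zactionn/UMich-Python3 | Activity: 14.2.7 ActiveCode (ac14_2_2).py | stop_at_four
-- ===== SOURCE A (Python) =====
-- def stop_at_four(x: int) -> int:
--     newlist = []
--     index = 0
--     while index < len(x):
--         if x[index] == 4:
--             break
--         newlist.append(x[index])
--         index += 1
--     return newlist
-- ===== SOURCE B (Python) =====
-- def stop_at_four(x):
--     try:
--         return x[:x.index(4)]
--     except ValueError:
--         return x[:]
-- ===== Notes on version B (the rewrite author's own statement) =====
-- stated objective: simpler
-- what changed: Replaces the element-by-element scan-and-append while loop with a locate-then-bulk-copy decomposition: find the index of the first 4 (or none) and return the prefix as one slice / full copy.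
import Mathlib
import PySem

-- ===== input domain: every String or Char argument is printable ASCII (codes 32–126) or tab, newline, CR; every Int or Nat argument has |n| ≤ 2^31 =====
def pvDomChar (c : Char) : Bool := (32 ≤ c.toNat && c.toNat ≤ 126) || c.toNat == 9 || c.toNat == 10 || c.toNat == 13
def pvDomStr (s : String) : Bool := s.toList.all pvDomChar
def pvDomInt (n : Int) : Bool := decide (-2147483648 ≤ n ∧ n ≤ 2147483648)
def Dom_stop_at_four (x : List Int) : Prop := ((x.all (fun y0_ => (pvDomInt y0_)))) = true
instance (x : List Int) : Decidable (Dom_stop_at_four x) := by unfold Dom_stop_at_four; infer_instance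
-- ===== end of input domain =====

-- B replaces A's scan-and-append while loop by locate-the-first-4-then-slice; objective: simpler.


-- ===== PORT A =====
-- while index < len(x): if x[index] == 4: break; newlist.append(x[index]); index += 1
def stop_at_four_loop (x : List Int) (index : Nat) (newlist : List Int) : List Int :=
  if h : index < x.length then
    if x[index] = 4 then newlist
    else stop_at_four_loop x (index + 1) (newlist ++ [x[index]])
  else newlist
termination_by x.length - index

def stop_at_four (x : List Int) : List Int :=
  stop_at_four_loop x 0 []

-- ===== PORT B =====
-- try: return x[:x.index(4)]  except ValueError: return x[:]
def stop_at_four_alt (x : List Int) : List Int :=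
  match PySem.List.index? x 4 with
  | some i => PySem.List.slice x none (some (i : Int))
  | none => x

-- ===== PRECONDITION & SPEC =====
def Spec_stop_at_four (x : List Int) (out : List Int) : Prop := out = stop_at_four_alt x
instance (x : List Int) (out : List Int) : Decidable (Spec_stop_at_four x out) := by unfold Spec_stop_at_four; infer_instance

-- ===== CLAIM (what is proved, stated in full; the proofs are below) =====
def Claim_equal_stop_at_four : Prop := ∀ (x : List Int), Dom_stop_at_four x → Spec_stop_at_four x (stop_at_four x)

-- ===== LEMMAS AND PROOFS =====
theorem stop_at_four_loop_eq (x : List Int) (index : Nat) (newlist : List Int) :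
    stop_at_four_loop x index newlist = newlist ++ (x.drop index).takeWhile (fun a => a ≠ 4) := by
  induction index, newlist using stop_at_four_loop.induct x with
  | case1 index newlist h h4 =>
      rw [stop_at_four_loop]
      simp only [dif_pos h, if_pos h4]
      rw [List.drop_eq_getElem_cons h, List.takeWhile_cons]
      simp [h4]
  | case2 index newlist h h4 ih =>
      rw [stop_at_four_loop]
      simp only [dif_pos h, if_neg h4]
      rw [ih, List.drop_eq_getElem_cons h, List.takeWhile_cons]
      simp [h4]
  | case3 index newlist h =>
      rw [stop_at_four_loop]
      simp [dif_neg h, List.drop_eq_nil_of_le (Nat.le_of_not_lt h)]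

theorem stop_at_four_alt_eq (x : List Int) :
    stop_at_four_alt x = x.takeWhile (fun a => a ≠ 4) := by
  induction x with
  | nil => rfl
  | cons a t ih =>
      by_cases ha : a = 4
      · subst ha
        have h0 : PySem.List.index? ((4 : Int) :: t) 4 = some 0 := PySem.List.index?_cons_self ..
        simp only [stop_at_four_alt, h0]
        have : PySem.List.slice ((4 : Int) :: t) none (some ((0 : Nat) : Int)) = [] := by
          rw [PySem.List.slice_to_natCast]; simp
        simpa using this
      · have hcons : PySem.List.index? (a :: t) 4 = (PySem.List.index? t 4).map (· + 1) :=
          PySem.List.index?_cons_of_ne _ ha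
        unfold stop_at_four_alt
        rw [hcons]
        unfold stop_at_four_alt at ih
        cases hi : PySem.List.index? t 4 with
        | none =>
            rw [hi] at ih
            have ih' : t = List.takeWhile (fun a => decide (a ≠ 4)) t := ih
            show (a :: t : List Int) = List.takeWhile (fun a => decide (a ≠ 4)) (a :: t)
            rw [List.takeWhile_cons, if_pos (by simp [ha])]
            exact congrArg _ ih'
        | some i =>
            rw [hi] at ih
            have ih' : PySem.List.slice t none (some ((i : Nat) : Int))
                = List.takeWhile (fun a => decide (a ≠ 4)) t := ih
            simp only [Option.map_some]
            have hc : ((i : Int) + 1) = (((i + 1 : Nat) : Int)) := by push_cast; ring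
            show PySem.List.slice (a :: t) none (some ((i : Int) + 1)) = _
            rw [hc, PySem.List.slice_to_natCast] at *
            rw [List.take_succ_cons, List.takeWhile_cons]
            simp [ha, ih']

-- ===== VERDICT (by name: the statement is the Claim_ definition above) =====
theorem stop_at_four_spec : Claim_equal_stop_at_four := by
  intro x _
  unfold Spec_stop_at_four stop_at_four
  rw [stop_at_four_loop_eq, stop_at_four_alt_eq]
  simp
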